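-- pv_equiv track=rewrite | github.com/GilbertHarijanto/arcade | social_image_generator.py | _extract_task_context
-- ===== SOURCE A (Python) =====
-- def _extract_task_context(flow_name: str) -> str:
--     """Extract what the user is actually trying to accomplish"""
--     flow_lower = flow_name.lower()
--
--     # SaaS/Digital product task patterns
--     if any(word in flow_lower for word in ['setup', 'set up', 'configure']):
--         return 'setup and configuration'
--     elif any(word in flow_lower for word in ['create', 'build', 'design']):
--         return 'creation and design'
--     elif any(word in flow_lower for word in ['workspace', 'account', 'profile']):
--         return 'workspace setup'
--     elif any(word in flow_lower for word in ['dashboard', 'analytics', 'report']):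
--         return 'analytics and reporting'
--     elif any(word in flow_lower for word in ['meeting', 'call', 'schedule']):
--         return 'meeting and scheduling'
--     elif any(word in flow_lower for word in ['project', 'task', 'workflow']):
--         return 'project management'
--     elif any(word in flow_lower for word in ['team', 'collaboration', 'share']):
--         return 'team collaboration'
--     elif any(word in flow_lower for word in ['cart', 'shop', 'buy', 'purchase']):
--         return 'online shopping'
--     elif any(word in flow_lower for word in ['onboard', 'tutorial', 'learn']):
--         return 'learning and onboarding'
--     else:
--         return 'digital workflow'
-- ===== SOURCE B (Python) =====
-- _KEYWORDS = [
--     ('setup', 0), ('set up', 0), ('configure', 0),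
--     ('create', 1), ('build', 1), ('design', 1),
--     ('workspace', 2), ('account', 2), ('profile', 2),
--     ('dashboard', 3), ('analytics', 3), ('report', 3),
--     ('meeting', 4), ('call', 4), ('schedule', 4),
--     ('project', 5), ('task', 5), ('workflow', 5),
--     ('team', 6), ('collaboration', 6), ('share', 6),
--     ('cart', 7), ('shop', 7), ('buy', 7), ('purchase', 7),
--     ('onboard', 8), ('tutorial', 8), ('learn', 8),
-- ]
-- _CONTEXTS = ['setup and configuration', 'creation and design', 'workspace setup',
--              'analytics and reporting', 'meeting and scheduling', 'project management',
--              'team collaboration', 'online shopping', 'learning and onboarding']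
--
--
-- def _extract_task_context(flow_name: str) -> str:
--     """Extract what the user is actually trying to accomplish"""
--     s = flow_name.lower()
--     best = len(_CONTEXTS)
--     for i in range(len(s)):
--         for kw, rank in _KEYWORDS:
--             if rank < best and s.startswith(kw, i):
--                 best = rank
--     return _CONTEXTS[best] if best < len(_CONTEXTS) else 'digital workflow'
-- ===== Notes on version B (the rewrite author's own statement) =====
-- stated objective: alternative
-- what changed: Instead of testing keyword groups in an if/elif cascade of whole-string substring searches, B makes one left-to-right scan over the positions of the lowercased name, checks which keywords of a flat (keyword, rank) table start at each position, and keeps the minimum rank seen; the answer is the context of that rank (or the default). It trades the C-level substring search of A for an explicit per-position scan, so it is not faster, just a genuinely different traversal.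
import Mathlib
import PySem

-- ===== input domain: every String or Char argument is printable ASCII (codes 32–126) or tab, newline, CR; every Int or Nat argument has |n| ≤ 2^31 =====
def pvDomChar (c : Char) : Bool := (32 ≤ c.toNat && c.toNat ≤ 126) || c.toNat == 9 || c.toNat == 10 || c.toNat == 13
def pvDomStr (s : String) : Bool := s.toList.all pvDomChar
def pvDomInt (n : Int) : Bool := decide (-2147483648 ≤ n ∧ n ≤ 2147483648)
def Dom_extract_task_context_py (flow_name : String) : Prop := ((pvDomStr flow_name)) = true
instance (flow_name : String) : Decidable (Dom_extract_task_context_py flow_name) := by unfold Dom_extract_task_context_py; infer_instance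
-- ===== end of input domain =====

-- B replaces A's if/elif keyword-group cascade by a single position scan over the lowercased name with a min-rank accumulator over a flat keyword table (alternative algorithm; no speed claim).


-- ===== PORT A =====
def extract_task_context_py (flow_name : String) : String :=
  let flow_lower := PySem.Str.lower flow_name
  if ["setup", "set up", "configure"].any (fun w => PySem.Str.isIn w flow_lower) then
    "setup and configuration"
  else if ["create", "build", "design"].any (fun w => PySem.Str.isIn w flow_lower) then
    "creation and design"
  else if ["workspace", "account", "profile"].any (fun w => PySem.Str.isIn w flow_lower) then
    "workspace setup"
  else if ["dashboard", "analytics", "report"].any (fun w => PySem.Str.isIn w flow_lower) then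
    "analytics and reporting"
  else if ["meeting", "call", "schedule"].any (fun w => PySem.Str.isIn w flow_lower) then
    "meeting and scheduling"
  else if ["project", "task", "workflow"].any (fun w => PySem.Str.isIn w flow_lower) then
    "project management"
  else if ["team", "collaboration", "share"].any (fun w => PySem.Str.isIn w flow_lower) then
    "team collaboration"
  else if ["cart", "shop", "buy", "purchase"].any (fun w => PySem.Str.isIn w flow_lower) then
    "online shopping"
  else if ["onboard", "tutorial", "learn"].any (fun w => PySem.Str.isIn w flow_lower) then
    "learning and onboarding"
  else
    "digital workflow"

-- ===== PORT B =====
-- flat (keyword, rank) table of Source B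
def kwTable : List (List Char × Nat) :=
  [("setup".toList, 0), ("set up".toList, 0), ("configure".toList, 0),
   ("create".toList, 1), ("build".toList, 1), ("design".toList, 1),
   ("workspace".toList, 2), ("account".toList, 2), ("profile".toList, 2),
   ("dashboard".toList, 3), ("analytics".toList, 3), ("report".toList, 3),
   ("meeting".toList, 4), ("call".toList, 4), ("schedule".toList, 4),
   ("project".toList, 5), ("task".toList, 5), ("workflow".toList, 5),
   ("team".toList, 6), ("collaboration".toList, 6), ("share".toList, 6),
   ("cart".toList, 7), ("shop".toList, 7), ("buy".toList, 7), ("purchase".toList, 7),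
   ("onboard".toList, 8), ("tutorial".toList, 8), ("learn".toList, 8)]

def contexts : List String :=
  ["setup and configuration", "creation and design", "workspace setup",
   "analytics and reporting", "meeting and scheduling", "project management",
   "team collaboration", "online shopping", "learning and onboarding"]

-- Source B: scan positions i of the lowered name, keep the minimum rank of a keyword starting at i.
-- Python's s.startswith(kw, i) with 0 ≤ i is exactly s[i:].startswith(kw): ported as startswith on (s.drop i).
-- _CONTEXTS[best] is read under the guard best < len(_CONTEXTS), so getD is exact there.
def extract_task_context_py_alt (flow_name : String) : String :=
  let s := (PySem.Str.lower flow_name).toList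
  let best := (PySem.List.pyRange 0 s.length 1).foldl
    (fun b i => kwTable.foldl
      (fun b p => if p.2 < b && PySem.Chars.startswith (s.drop i.toNat) p.1 then p.2 else b) b)
    contexts.length
  if best < contexts.length then contexts.getD best "digital workflow" else "digital workflow"

-- ===== PRECONDITION & SPEC =====
def Spec_extract_task_context_py (flow_name : String) (out : String) : Prop := out = extract_task_context_py_alt flow_name
instance (flow_name : String) (out : String) : Decidable (Spec_extract_task_context_py flow_name out) := by unfold Spec_extract_task_context_py; infer_instance

-- ===== CLAIM (what is proved, stated in full; the proofs are below) =====
def Claim_equal_extract_task_context_py : Prop := ∀ (flow_name : String), Dom_extract_task_context_py flow_name → Spec_extract_task_context_py flow_name (extract_task_context_py flow_name)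

-- ===== LEMMAS AND PROOFS =====

-- all (position, (keyword, rank)) candidates B inspects
def cand (s : List Char) : List (Nat × (List Char × Nat)) :=
  (List.range s.length).flatMap (fun i => kwTable.map (Prod.mk i))

-- candidate matches: its keyword starts at its position
def cOk (s : List Char) (q : Nat × (List Char × Nat)) : Bool :=
  PySem.Chars.startswith (s.drop q.1) q.2.1

def bestOf (s : List Char) : Nat :=
  (cand s).foldl (fun b q => if cOk s q then min b q.2.2 else b) 9

-- rank g has a matching keyword somewhere in s (A's branch condition for group g)
def M (s : List Char) (g : Nat) : Bool :=
  kwTable.any (fun p => p.2 == g && PySem.Chars.isIn p.1 s)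

theorem foldl_if_min {α : Type} (c : α → Bool) (r : α → Nat) (L : List α) (b : Nat) :
    L.foldl (fun b p => if r p < b && c p then r p else b) b
      = L.foldl (fun b p => if c p then min b (r p) else b) b := by
  induction L generalizing b with
  | nil => rfl
  | cons p L ih =>
    simp only [List.foldl_cons]
    have h : (if r p < b && c p then r p else b) = (if c p then min b (r p) else b) := by
      by_cases hc : c p <;> by_cases hr : r p < b <;> simp [hc, hr, Nat.min_def]
    rw [h, ih]

theorem foldl_min_le_init {α : Type} (c : α → Bool) (r : α → Nat) (L : List α) (b : Nat) :
    L.foldl (fun b q => if c q then min b (r q) else b) b ≤ b := by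
  induction L generalizing b with
  | nil => simp
  | cons q L ih =>
    simp only [List.foldl_cons]
    refine le_trans (ih _) ?_
    split <;> simp

theorem foldl_min_le {α : Type} (c : α → Bool) (r : α → Nat) (L : List α) (b : Nat)
    (q : α) (hq : q ∈ L) (hc : c q = true) :
    L.foldl (fun b q => if c q then min b (r q) else b) b ≤ r q := by
  induction L generalizing b with
  | nil => cases hq
  | cons p L ih =>
    simp only [List.foldl_cons]
    rcases List.mem_cons.mp hq with h | h
    · subst h
      refine le_trans (foldl_min_le_init c r L _) ?_
      simp [hc]
    · exact ih _ h

theorem foldl_min_cases {α : Type} (c : α → Bool) (r : α → Nat) (L : List α) (b : Nat) :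
    L.foldl (fun b q => if c q then min b (r q) else b) b = b ∨
      ∃ q ∈ L, c q = true ∧ L.foldl (fun b q => if c q then min b (r q) else b) b = r q := by
  induction L generalizing b with
  | nil => left; rfl
  | cons q L ih =>
    simp only [List.foldl_cons]
    by_cases hc : c q
    · simp only [hc, if_pos]
      rcases ih (min b (r q)) with h | ⟨q', hq', hc', h⟩
      · by_cases hm : b ≤ r q
        · left; rw [h, min_eq_left hm]
        · right; exact ⟨q, List.mem_cons_self, hc, by rw [h, min_eq_right (Nat.le_of_not_le hm)]⟩
      · right; exact ⟨q', List.mem_cons_of_mem _ hq', hc', h⟩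
    · simp only [hc, if_neg, Bool.false_eq_true, not_false_iff]
      rcases ih b with h | ⟨q', hq', hc', h⟩
      · left; exact h
      · right; exact ⟨q', List.mem_cons_of_mem _ hq', hc', h⟩

theorem foldl_foldl {ι α : Type} (l : List ι) (m : List α) (f : ι → Nat → α → Nat) (b : Nat) :
    l.foldl (fun b i => m.foldl (f i) b) b
      = (l.flatMap fun i => m.map (Prod.mk i)).foldl (fun b q => f q.1 b q.2) b := by
  induction l generalizing b with
  | nil => rfl
  | cons i l ih =>
    simp only [List.foldl_cons, List.flatMap_cons, List.foldl_append, List.foldl_map, ih]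

theorem kw_ne_nil : ∀ p ∈ kwTable, p.1 ≠ [] := by decide

-- B's nested fold is bestOf
theorem alt_eq (flow_name : String) :
    extract_task_context_py_alt flow_name =
      (if bestOf (PySem.Str.lower flow_name).toList < 9 then
        contexts.getD (bestOf (PySem.Str.lower flow_name).toList) "digital workflow"
       else "digital workflow") := by
  unfold extract_task_context_py_alt bestOf cand cOk
  simp only [PySem.List.pyRange_one, Int.sub_zero, Int.toNat_natCast, List.foldl_map]
  rw [show contexts.length = 9 from rfl,
    foldl_foldl (List.range (PySem.Str.lower flow_name).toList.length) kwTable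
      (fun i b p => if (decide (p.2 < b) && PySem.Chars.startswith (List.drop ((0:Int)+(i:Int)).toNat (PySem.Str.lower flow_name).toList) p.1) = true then p.2 else b) 9]
  have h2 := foldl_if_min
      (fun q : Nat × (List Char × Nat) => PySem.Chars.startswith (List.drop ((0:Int)+(q.1:Int)).toNat (PySem.Str.lower flow_name).toList) q.2.1)
      (fun q : Nat × (List Char × Nat) => q.2.2)
      (List.flatMap (fun i => List.map (Prod.mk i) kwTable) (List.range (PySem.Str.lower flow_name).toList.length)) 9
  beta_reduce at h2
  rw [h2]
  rw [show (fun (b : Nat) (q : Nat × (List Char × Nat)) =>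
        if PySem.Chars.startswith (List.drop ((0:Int)+(q.1:Int)).toNat (PySem.Str.lower flow_name).toList) q.2.1 = true
        then min b q.2.2 else b)
      = (fun (b : Nat) (q : Nat × (List Char × Nat)) =>
        if PySem.Chars.startswith (List.drop q.1 (PySem.Str.lower flow_name).toList) q.2.1 = true
        then min b q.2.2 else b) from funext fun b => funext fun q => by simp]

-- matching candidates have matching ranks
theorem cand_M (s : List Char) (q : Nat × (List Char × Nat)) (hq : q ∈ cand s)
    (hc : cOk s q = true) : M s q.2.2 = true := by
  simp only [cand, List.mem_flatMap, List.mem_map, List.mem_range] at hq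
  obtain ⟨i, hi, p, hp, rfl⟩ := hq
  simp only [cOk] at hc
  have hpre : p.1 <+: s.drop i := (PySem.Chars.startswith_iff _ _).mp hc
  have hin : PySem.Chars.isIn p.1 s = true :=
    (PySem.Chars.exists_prefix_drop_iff_isIn _ _).mp ⟨i, hpre⟩
  simp only [M, List.any_eq_true]
  exact ⟨p, hp, by simp [hin]⟩

-- a matching rank bounds bestOf
theorem bestOf_le (s : List Char) (g : Nat) (hg : M s g = true) : bestOf s ≤ g := by
  simp only [M, List.any_eq_true, Bool.and_eq_true, beq_iff_eq] at hg
  obtain ⟨p, hp, hpg, hin⟩ := hg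
  obtain ⟨j, hj⟩ := (PySem.Chars.exists_prefix_drop_iff_isIn _ _).mpr hin
  have hjlt : j < s.length := by
    by_contra hge
    rw [List.drop_eq_nil_of_le (Nat.le_of_not_lt hge)] at hj
    exact kw_ne_nil p hp (List.prefix_nil.mp hj)
  have hmem : (j, p) ∈ cand s := by
    simp only [cand, List.mem_flatMap, List.mem_map, List.mem_range]
    exact ⟨j, hjlt, p, hp, rfl⟩
  have hok : cOk s (j, p) = true := by
    simp only [cOk]
    exact (PySem.Chars.startswith_iff _ _).mpr hj
  have := foldl_min_le (cOk s) (fun q => q.2.2) (cand s) 9 (j, p) hmem hok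
  simpa [hpg] using this

theorem bestOf_le_nine (s : List Char) : bestOf s ≤ 9 :=
  foldl_min_le_init _ _ _ _

theorem bestOf_cases (s : List Char) : bestOf s = 9 ∨ M s (bestOf s) = true := by
  rcases foldl_min_cases (cOk s) (fun q => q.2.2) (cand s) 9 with h | ⟨q, hq, hc, h⟩
  · left; exact h
  · right; rw [show bestOf s = q.2.2 from h]; exact cand_M s q hq hc

theorem bestOf_exact (s : List Char) (k : Nat) (hk8 : k ≤ 8) (hMk : M s k = true)
    (hprev : ∀ j, j < k → M s j = false) : bestOf s = k := by
  have h1 : bestOf s ≤ k := bestOf_le s k hMk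
  rcases bestOf_cases s with h | h
  · omega
  · by_contra hne
    have hlt : bestOf s < k := lt_of_le_of_ne h1 hne
    rw [hprev _ hlt] at h
    cases h

theorem bestOf_none (s : List Char) (h : ∀ j, j ≤ 8 → M s j = false) : bestOf s = 9 := by
  rcases bestOf_cases s with h9 | hM
  · exact h9
  · have h9' := bestOf_le_nine s
    by_cases hb : bestOf s = 9
    · exact hb
    · rw [h _ (by omega)] at hM
      cases hM


-- ===== VERDICT (by name: the statement is the Claim_ definition above) =====
set_option maxHeartbeats 2000000 in
theorem extract_task_context_py_spec : Claim_equal_extract_task_context_py := by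
  intro flow_name _
  unfold Spec_extract_task_context_py
  rw [alt_eq]
  simp only [extract_task_context_py]
  have e0 : (["setup", "set up", "configure"].any fun w => PySem.Str.isIn w (PySem.Str.lower flow_name)) = M (PySem.Str.lower flow_name).toList 0 := by
    simp [M, kwTable, PySem.Str.isIn]
  have e1 : (["create", "build", "design"].any fun w => PySem.Str.isIn w (PySem.Str.lower flow_name)) = M (PySem.Str.lower flow_name).toList 1 := by
    simp [M, kwTable, PySem.Str.isIn]
  have e2 : (["workspace", "account", "profile"].any fun w => PySem.Str.isIn w (PySem.Str.lower flow_name)) = M (PySem.Str.lower flow_name).toList 2 := by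
    simp [M, kwTable, PySem.Str.isIn]
  have e3 : (["dashboard", "analytics", "report"].any fun w => PySem.Str.isIn w (PySem.Str.lower flow_name)) = M (PySem.Str.lower flow_name).toList 3 := by
    simp [M, kwTable, PySem.Str.isIn]
  have e4 : (["meeting", "call", "schedule"].any fun w => PySem.Str.isIn w (PySem.Str.lower flow_name)) = M (PySem.Str.lower flow_name).toList 4 := by
    simp [M, kwTable, PySem.Str.isIn]
  have e5 : (["project", "task", "workflow"].any fun w => PySem.Str.isIn w (PySem.Str.lower flow_name)) = M (PySem.Str.lower flow_name).toList 5 := by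
    simp [M, kwTable, PySem.Str.isIn]
  have e6 : (["team", "collaboration", "share"].any fun w => PySem.Str.isIn w (PySem.Str.lower flow_name)) = M (PySem.Str.lower flow_name).toList 6 := by
    simp [M, kwTable, PySem.Str.isIn]
  have e7 : (["cart", "shop", "buy", "purchase"].any fun w => PySem.Str.isIn w (PySem.Str.lower flow_name)) = M (PySem.Str.lower flow_name).toList 7 := by
    simp [M, kwTable, PySem.Str.isIn]
  have e8 : (["onboard", "tutorial", "learn"].any fun w => PySem.Str.isIn w (PySem.Str.lower flow_name)) = M (PySem.Str.lower flow_name).toList 8 := by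
    simp [M, kwTable, PySem.Str.isIn]
  rw [e0, e1, e2, e3, e4, e5, e6, e7, e8]
  have hexact := bestOf_exact (PySem.Str.lower flow_name).toList
  have hnone := bestOf_none (PySem.Str.lower flow_name).toList
  by_cases h0 : M (PySem.Str.lower flow_name).toList 0 = true
  case pos =>
    rw [hexact 0 (by omega) h0 (by intro j hj; omega)]
    rw [if_pos h0]
    decide
  case neg =>
  have h0' : M (PySem.Str.lower flow_name).toList 0 = false := by simpa using h0
  by_cases h1 : M (PySem.Str.lower flow_name).toList 1 = true
  case pos =>
    rw [hexact 1 (by omega) h1 (by intro j hj; rcases (by omega : j = 0) with rfl; exacts [h0'])]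
    rw [if_neg h0, if_pos h1]
    decide
  case neg =>
  have h1' : M (PySem.Str.lower flow_name).toList 1 = false := by simpa using h1
  by_cases h2 : M (PySem.Str.lower flow_name).toList 2 = true
  case pos =>
    rw [hexact 2 (by omega) h2 (by intro j hj; rcases (by omega : j = 0 ∨ j = 1) with rfl | rfl; exacts [h0', h1'])]
    rw [if_neg h0, if_neg h1, if_pos h2]
    decide
  case neg =>
  have h2' : M (PySem.Str.lower flow_name).toList 2 = false := by simpa using h2
  by_cases h3 : M (PySem.Str.lower flow_name).toList 3 = true
  case pos =>
    rw [hexact 3 (by omega) h3 (by intro j hj; rcases (by omega : j = 0 ∨ j = 1 ∨ j = 2) with rfl | rfl | rfl; exacts [h0', h1', h2'])]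
    rw [if_neg h0, if_neg h1, if_neg h2, if_pos h3]
    decide
  case neg =>
  have h3' : M (PySem.Str.lower flow_name).toList 3 = false := by simpa using h3
  by_cases h4 : M (PySem.Str.lower flow_name).toList 4 = true
  case pos =>
    rw [hexact 4 (by omega) h4 (by intro j hj; rcases (by omega : j = 0 ∨ j = 1 ∨ j = 2 ∨ j = 3) with rfl | rfl | rfl | rfl; exacts [h0', h1', h2', h3'])]
    rw [if_neg h0, if_neg h1, if_neg h2, if_neg h3, if_pos h4]
    decide
  case neg =>
  have h4' : M (PySem.Str.lower flow_name).toList 4 = false := by simpa using h4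
  by_cases h5 : M (PySem.Str.lower flow_name).toList 5 = true
  case pos =>
    rw [hexact 5 (by omega) h5 (by intro j hj; rcases (by omega : j = 0 ∨ j = 1 ∨ j = 2 ∨ j = 3 ∨ j = 4) with rfl | rfl | rfl | rfl | rfl; exacts [h0', h1', h2', h3', h4'])]
    rw [if_neg h0, if_neg h1, if_neg h2, if_neg h3, if_neg h4, if_pos h5]
    decide
  case neg =>
  have h5' : M (PySem.Str.lower flow_name).toList 5 = false := by simpa using h5
  by_cases h6 : M (PySem.Str.lower flow_name).toList 6 = true
  case pos =>
    rw [hexact 6 (by omega) h6 (by intro j hj; rcases (by omega : j = 0 ∨ j = 1 ∨ j = 2 ∨ j = 3 ∨ j = 4 ∨ j = 5) with rfl | rfl | rfl | rfl | rfl | rfl; exacts [h0', h1', h2', h3', h4', h5'])]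
    rw [if_neg h0, if_neg h1, if_neg h2, if_neg h3, if_neg h4, if_neg h5, if_pos h6]
    decide
  case neg =>
  have h6' : M (PySem.Str.lower flow_name).toList 6 = false := by simpa using h6
  by_cases h7 : M (PySem.Str.lower flow_name).toList 7 = true
  case pos =>
    rw [hexact 7 (by omega) h7 (by intro j hj; rcases (by omega : j = 0 ∨ j = 1 ∨ j = 2 ∨ j = 3 ∨ j = 4 ∨ j = 5 ∨ j = 6) with rfl | rfl | rfl | rfl | rfl | rfl | rfl; exacts [h0', h1', h2', h3', h4', h5', h6'])]
    rw [if_neg h0, if_neg h1, if_neg h2, if_neg h3, if_neg h4, if_neg h5, if_neg h6, if_pos h7]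
    decide
  case neg =>
  have h7' : M (PySem.Str.lower flow_name).toList 7 = false := by simpa using h7
  by_cases h8 : M (PySem.Str.lower flow_name).toList 8 = true
  case pos =>
    rw [hexact 8 (by omega) h8 (by intro j hj; rcases (by omega : j = 0 ∨ j = 1 ∨ j = 2 ∨ j = 3 ∨ j = 4 ∨ j = 5 ∨ j = 6 ∨ j = 7) with rfl | rfl | rfl | rfl | rfl | rfl | rfl | rfl; exacts [h0', h1', h2', h3', h4', h5', h6', h7'])]
    rw [if_neg h0, if_neg h1, if_neg h2, if_neg h3, if_neg h4, if_neg h5, if_neg h6, if_neg h7, if_pos h8]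
    decide
  case neg =>
  have h8' : M (PySem.Str.lower flow_name).toList 8 = false := by simpa using h8
  rw [hnone (by intro j hj; rcases (by omega : j = 0 ∨ j = 1 ∨ j = 2 ∨ j = 3 ∨ j = 4 ∨ j = 5 ∨ j = 6 ∨ j = 7 ∨ j = 8) with rfl | rfl | rfl | rfl | rfl | rfl | rfl | rfl | rfl; exacts [h0', h1', h2', h3', h4', h5', h6', h7', h8'])]
  rw [if_neg h0, if_neg h1, if_neg h2, if_neg h3, if_neg h4, if_neg h5, if_neg h6, if_neg h7, if_neg h8]
  decide
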